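-- pv_equiv track=rewrite | github.com/vatsalmavani/grokking | 02 Two Pointers/07 3Sum Smaller.py | smaller3sumVarient
-- ===== SOURCE A (Python) =====
-- def smaller3sumVarient(nums, target):
--     nums.sort()
--     res = []
--     for i in range(len(nums) - 2):
--         new_target = target - nums[i]
--         l, r = i+1, len(nums)-1
--         while l < r:
--             cur_sum = nums[l] + nums[r]
--             if cur_sum < new_target:
--                 # this part is changed
--                 for x in range(r, l, -1):
--                     res.append([nums[i], nums[l], nums[x]])
--                 l += 1
--             else:
--                 r -= 1
--     return res
-- ===== SOURCE B (Python) =====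
-- def smaller3sumVarient(nums, target):
--     nums.sort()
--     n = len(nums)
--     res = []
--     for i in range(n - 2):
--         for l in range(i + 1, n - 1):
--             for x in range(n - 1, l, -1):
--                 if nums[i] + nums[l] + nums[x] < target:
--                     res.append([nums[i], nums[l], nums[x]])
--     return res
-- ===== Notes on version B (the rewrite author's own statement) =====
-- stated objective: simpler
-- what changed: Replaces A's two-pointer while-loop (with its bulk emission on each left-pointer advance) by a plain sorted brute-force triple loop whose inner index runs downward with a strict comparison, producing the identical output order.
import Mathlib
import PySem

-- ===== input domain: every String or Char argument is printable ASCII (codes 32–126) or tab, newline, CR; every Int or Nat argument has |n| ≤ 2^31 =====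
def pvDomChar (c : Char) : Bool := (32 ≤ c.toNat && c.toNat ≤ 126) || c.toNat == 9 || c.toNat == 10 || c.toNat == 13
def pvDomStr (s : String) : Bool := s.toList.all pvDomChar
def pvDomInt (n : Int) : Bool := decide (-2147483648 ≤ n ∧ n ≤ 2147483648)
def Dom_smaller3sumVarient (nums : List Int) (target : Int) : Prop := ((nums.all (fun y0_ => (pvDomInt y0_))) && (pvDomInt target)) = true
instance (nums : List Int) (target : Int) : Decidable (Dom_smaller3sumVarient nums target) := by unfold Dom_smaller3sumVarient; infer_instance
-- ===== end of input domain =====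

-- B replaces A's two-pointer scan with a plain sorted brute-force triple loop (simpler);
-- both Pythons sort `nums` in place (same side effect); the theorems are about the return value.

-- ===== PORT A =====
-- `for x in range(r, l, -1)` over Nat indices: [r, r-1, …, l+1] (exact for the in-range indices used here)
def pvDownTo (r l : Nat) : List Nat :=
  if l < r then r :: pvDownTo (r - 1) l else []
termination_by r

-- the `while l < r` loop of A; all indices accessed are in range, so `getD` is exact
def pvGoA (s : List Int) (i : Nat) (nt : Int) (l r : Nat) : List (List Int) :=
  if _h : l < r then
    if s.getD l 0 + s.getD r 0 < nt then
      ((pvDownTo r l).map fun x => [s.getD i 0, s.getD l 0, s.getD x 0]) ++ pvGoA s i nt (l + 1) r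
    else
      pvGoA s i nt l (r - 1)
  else []
termination_by r - l

def smaller3sumVarient (nums : List Int) (target : Int) : List (List Int) :=
  let s := PySem.List.sorted nums (fun x => x) false
  (List.range (s.length - 2)).foldl
    (fun res i => res ++ pvGoA s i (target - s.getD i 0) (i + 1) (s.length - 1)) []

-- ===== PORT B =====
-- inner `for x in range(n-1, l, -1): if …: res.append(…)` of B
def pvGoB (s : List Int) (target : Int) (i l : Nat) : List (List Int) :=
  (pvDownTo (s.length - 1) l).foldl
    (fun acc x =>
      if s.getD i 0 + s.getD l 0 + s.getD x 0 < target then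
        acc ++ [[s.getD i 0, s.getD l 0, s.getD x 0]]
      else acc) []

def smaller3sumVarient_alt (nums : List Int) (target : Int) : List (List Int) :=
  let s := PySem.List.sorted nums (fun x => x) false
  (List.range (s.length - 2)).foldl
    (fun res i =>
      (List.range' (i + 1) (s.length - 1 - (i + 1))).foldl
        (fun res2 l => res2 ++ pvGoB s target i l) res) []

-- ===== PRECONDITION & SPEC =====
def Spec_smaller3sumVarient (nums : List Int) (target : Int) (out : List (List Int)) : Prop := out = smaller3sumVarient_alt nums target
instance (nums : List Int) (target : Int) (out : List (List Int)) : Decidable (Spec_smaller3sumVarient nums target out) := by unfold Spec_smaller3sumVarient; infer_instance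

-- ===== CLAIM (what is proved, stated in full; the proofs are below) =====
def Claim_equal_smaller3sumVarient : Prop := ∀ (nums : List Int) (target : Int), Dom_smaller3sumVarient nums target → Spec_smaller3sumVarient nums target (smaller3sumVarient nums target)

-- ===== LEMMAS AND PROOFS =====

lemma pvDownTo_succ (k l : Nat) (h : l < k + 1) : pvDownTo (k + 1) l = (k + 1) :: pvDownTo k l := by
  rw [pvDownTo]
  simp [h]

lemma pvDownTo_eq_nil (m l : Nat) (h : m ≤ l) : pvDownTo m l = [] := by
  rw [pvDownTo]
  simp
  omega

lemma mem_pvDownTo (m l x : Nat) : x ∈ pvDownTo m l ↔ l < x ∧ x ≤ m := by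
  induction m with
  | zero =>
    rw [pvDownTo_eq_nil 0 l (by omega)]
    simp
    omega
  | succ k ih =>
    by_cases h : l < k + 1
    · rw [pvDownTo_succ k l h]
      simp only [List.mem_cons, ih]
      omega
    · rw [pvDownTo_eq_nil (k + 1) l (by omega)]
      simp
      omega

lemma pvDownTo_split (m r l : Nat) (h1 : l ≤ r) (h2 : r ≤ m) :
    pvDownTo m l = pvDownTo m r ++ pvDownTo r l := by
  induction m with
  | zero =>
    have hr0 : r = 0 := by omega
    subst hr0
    rw [pvDownTo_eq_nil 0 0 le_rfl]
    simp
  | succ k ih =>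
    by_cases hr : r = k + 1
    · subst hr
      rw [pvDownTo_eq_nil (k + 1) (k + 1) le_rfl]
      simp
    · have hrk : r ≤ k := by omega
      rw [pvDownTo_succ k l (by omega), pvDownTo_succ k r (by omega), ih hrk]
      simp

lemma foldl_append_flatMap (f : Nat → List (List Int)) (xs : List Nat) (init : List (List Int)) :
    xs.foldl (fun a b => a ++ f b) init = init ++ xs.flatMap f := by
  induction xs generalizing init with
  | nil => simp
  | cons x t ih => simp [List.foldl_cons, ih, List.flatMap_cons]

lemma foldl_if_filter_map (g : Nat → List Int) (c : Nat → Prop) [DecidablePred c]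
    (xs : List Nat) (init : List (List Int)) :
    (xs.foldl (fun a x => if c x then a ++ [g x] else a) init)
      = init ++ ((xs.filter (fun x => decide (c x))).map g) := by
  induction xs generalizing init with
  | nil => simp
  | cons x t ih =>
    simp only [List.foldl_cons]
    by_cases h : c x
    · rw [if_pos h, ih]
      simp [h]
    · rw [if_neg h, ih]
      simp [h]

lemma pvGoB_eq_filter (s : List Int) (target : Int) (i l : Nat) :
    pvGoB s target i l
      = ((pvDownTo (s.length - 1) l).filter
           (fun x => decide (s.getD i 0 + s.getD l 0 + s.getD x 0 < target))).map
          (fun x => [s.getD i 0, s.getD l 0, s.getD x 0]) := by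
  unfold pvGoB
  rw [foldl_if_filter_map (fun x => [s.getD i 0, s.getD l 0, s.getD x 0])
        (fun x => s.getD i 0 + s.getD l 0 + s.getD x 0 < target)]
  simp

-- the key invariant proof: A's two-pointer loop emits exactly what B's remaining l-loop emits
lemma pvGoA_eq (s : List Int)
    (hs : ∀ p q : Nat, p ≤ q → q < s.length → s.getD p 0 ≤ s.getD q 0)
    (target : Int) (i : Nat) :
    ∀ fuel l r : Nat, r - l ≤ fuel → i < l → l ≤ r → r ≤ s.length - 1 →
    (∀ x, r < x → x ≤ s.length - 1 → target ≤ s.getD i 0 + s.getD l 0 + s.getD x 0) →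
    pvGoA s i (target - s.getD i 0) l r
      = (List.range' l (s.length - 1 - l)).flatMap (fun l' => pvGoB s target i l') := by
  intro fuel
  induction fuel with
  | zero =>
    intro l r hf hil hlr hr hinv
    have hlr' : l = r := by omega
    subst hlr'
    rw [pvGoA]
    simp only [lt_irrefl, dite_false]
    symm
    rw [List.flatMap_eq_nil_iff]
    intro l' hl'
    rw [List.mem_range'] at hl'
    obtain ⟨k, hk1, hk2⟩ := hl'
    rw [pvGoB_eq_filter, List.map_eq_nil_iff, List.filter_eq_nil_iff]
    intro x hx
    rw [mem_pvDownTo] at hx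
    simp only [decide_eq_true_eq, not_lt]
    have hl'lt : l' < s.length := by omega
    have hxlt : x < s.length := by omega
    have h1 : s.getD l 0 ≤ s.getD l' 0 := hs l l' (by omega) hl'lt
    have h2 : target ≤ s.getD i 0 + s.getD l 0 + s.getD x 0 := hinv x (by omega) (by omega)
    omega
  | succ n ih =>
    intro l r hf hil hlr hr hinv
    by_cases h : l < r
    · rw [pvGoA]
      simp only [dif_pos h]
      have hrlt : r < s.length := by omega
      have hllt : l <s.length := by omega
      by_cases hc : s.getD l 0 + s.getD r 0 < target - s.getD i 0
      · rw [if_pos hc]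
        -- split off l' = l from the range on the right
        have hlen : s.length - 1 - l = (s.length - 1 - (l + 1)) + 1 := by omega
        rw [hlen, List.range'_succ, List.flatMap_cons]
        -- B's l-th chunk equals A's emitted chunk
        have hchunk : pvGoB s target i l
            = (pvDownTo r l).map (fun x => [s.getD i 0, s.getD l 0, s.getD x 0]) := by
          rw [pvGoB_eq_filter]
          rw [pvDownTo_split (s.length - 1) r l (by omega) (by omega)]
          rw [List.filter_append]
          have h1 : (pvDownTo (s.length - 1) r).filter
              (fun x => decide (s.getD i 0 + s.getD l 0 + s.getD x 0 < target)) = [] := by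
            rw [List.filter_eq_nil_iff]
            intro x hx
            rw [mem_pvDownTo] at hx
            simp only [decide_eq_true_eq, not_lt]
            have := hinv x hx.1 hx.2
            omega
          have h2 : (pvDownTo r l).filter
              (fun x => decide (s.getD i 0 + s.getD l 0 + s.getD x 0 < target)) = pvDownTo r l := by
            rw [List.filter_eq_self]
            intro x hx
            rw [mem_pvDownTo] at hx
            simp only [decide_eq_true_eq]
            have : s.getD x 0 ≤ s.getD r 0 := hs x r hx.2 hrlt
            omega
          rw [h1, h2, List.nil_append]
        rw [hchunk]
        congr 1
        exact ih (l + 1) r (by omega) (by omega) (by omega) hr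
          (fun x hx1 hx2 => by
            have h1 : s.getD l 0 ≤ s.getD (l + 1) 0 := hs l (l + 1) (by omega) (by omega)
            have h2 := hinv x hx1 hx2
            omega)
      · rw [if_neg hc]
        exact ih l (r - 1) (by omega) hil (by omega) (by omega)
          (fun x hx1 hx2 => by
            by_cases hxr : x = r
            · subst hxr; omega
            · exact hinv x (by omega) hx2)
    · -- l = r: same argument as the base case
      have hlr' : l = r := by omega
      subst hlr'
      rw [pvGoA]
      simp only [lt_irrefl, dite_false]
      symm
      rw [List.flatMap_eq_nil_iff]
      intro l' hl'
      rw [List.mem_range'] at hl'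
      obtain ⟨k, hk1, hk2⟩ := hl'
      rw [pvGoB_eq_filter, List.map_eq_nil_iff, List.filter_eq_nil_iff]
      intro x hx
      rw [mem_pvDownTo] at hx
      simp only [decide_eq_true_eq, not_lt]
      have h1 : s.getD l 0 ≤ s.getD l' 0 := hs l l' (by omega) (by omega)
      have h2 : target ≤ s.getD i 0 + s.getD l 0 + s.getD x 0 := hinv x (by omega) (by omega)
      omega

lemma foldl_ext_mem (f g : List (List Int) → Nat → List (List Int)) (xs : List Nat)
    (init : List (List Int)) (h : ∀ a x, x ∈ xs → f a x = g a x) :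
    xs.foldl f init = xs.foldl g init := by
  induction xs generalizing init with
  | nil => rfl
  | cons x t ih =>
    simp only [List.foldl_cons]
    rw [h init x (List.mem_cons_self)]
    exact ih _ (fun a y hy => h a y (List.mem_cons_of_mem _ hy))

-- ===== VERDICT (by name: the statement is the Claim_ definition above) =====
theorem smaller3sumVarient_spec : Claim_equal_smaller3sumVarient := by
  intro nums target _hdom
  unfold Spec_smaller3sumVarient smaller3sumVarient smaller3sumVarient_alt
  set s := PySem.List.sorted nums (fun x => x) false with hsdef
  have hs : ∀ p q : Nat, p ≤ q → q < s.length → s.getD p 0 ≤ s.getD q 0 := by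
    intro p q hpq hq
    have hp : p < s.length := by omega
    rw [List.getD_eq_getElem s 0 hp, List.getD_eq_getElem s 0 hq]
    exact PySem.List.sorted_id_getElem_mono nums hpq hq
  apply foldl_ext_mem
  intro res i hi
  rw [List.mem_range] at hi
  rw [foldl_append_flatMap (fun l => pvGoB s target i l) _ res]
  congr 1
  exact pvGoA_eq s hs target i (s.length) (i + 1) (s.length - 1) (by omega) (by omega)
    (by omega) (by omega) (fun x hx1 hx2 => by omega)
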